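-- pv_equiv track=rewrite | github.com/stranske/Trend_Model_Project | tests/test_multi_period_exits_cooldown.py | _count_reentries
-- ===== SOURCE A (Python) =====
-- from typing import Any
--
-- def _count_reentries(results: list[dict[str, Any]], manager: str) -> int:
--     reentries = 0
--     prev_in = False
--     for idx, res in enumerate(results):
--         selected = set(res.get("selected_funds") or [])
--         current_in = manager in selected
--         if idx > 0 and current_in and not prev_in:
--             reentries += 1
--         prev_in = current_in
--     return reentries
-- ===== SOURCE B (Python) =====
-- def _count_reentries(results: list, manager: str) -> int:
--     # Index-set / block-counting formulation: the selected periods form maximal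
--     # contiguous blocks; re-entries = number of blocks that do not start at period 0.
--     sel = {i for i, res in enumerate(results) if manager in (res.get("selected_funds") or [])}
--     starts = sum(1 for i in sel if i - 1 not in sel)
--     return starts - (1 if 0 in sel else 0)
-- ===== Notes on version B (the rewrite author's own statement) =====
-- stated objective: alternative
-- what changed: Replaces A's stateful transition scan (prev_in flag, idx>0 guard) with a set-of-selected-indices formulation: collect the indices where the manager is selected, count block starts (indices whose predecessor index is absent from the set), and subtract one if period 0 is selected.
import Mathlib
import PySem

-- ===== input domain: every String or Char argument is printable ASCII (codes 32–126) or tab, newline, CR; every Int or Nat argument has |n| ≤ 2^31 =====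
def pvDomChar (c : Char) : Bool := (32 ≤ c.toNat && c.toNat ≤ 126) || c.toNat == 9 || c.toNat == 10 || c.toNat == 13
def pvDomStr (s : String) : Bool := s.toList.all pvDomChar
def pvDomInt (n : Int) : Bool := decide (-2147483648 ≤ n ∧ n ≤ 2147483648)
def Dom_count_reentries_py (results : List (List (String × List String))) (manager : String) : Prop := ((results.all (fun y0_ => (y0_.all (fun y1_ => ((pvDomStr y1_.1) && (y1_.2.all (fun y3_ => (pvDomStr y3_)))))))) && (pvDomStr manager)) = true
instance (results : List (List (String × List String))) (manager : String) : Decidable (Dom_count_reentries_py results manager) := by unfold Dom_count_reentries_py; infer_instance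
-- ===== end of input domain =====

-- B: set-of-selected-indices formulation — count block starts, subtract one if period 0 is selected (alternative decomposition; same cost).
-- ===== PORT A =====
-- A's loop body (the enumerate-fold step), named so the proofs can speak about it
def pvStepA (manager : String) (st : Int × Bool) (p : Int × List (String × List String)) : Int × Bool :=
  let selected := PySem.Set.ofList
    (match (PySem.Dict.mk p.2).get? "selected_funds" with
     | some l => if List.isEmpty l then [] else l   -- `or []`: falsy (empty) list -> []
     | none => [])
  let current_in := PySem.Set.contains selected manager
  let reentries := if p.1 > 0 && current_in && !st.2 then st.1 + 1 else st.1
  (reentries, current_in)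

def count_reentries_py (results : List (List (String × List String))) (manager : String) : Int :=
  let st := (PySem.List.enumerate results 0).foldl (pvStepA manager) (0, false)
  st.1

-- ===== PORT B =====
-- per-period membership test: manager in (res.get("selected_funds") or [])
def pvFlagB (manager : String) (res : List (String × List String)) : Bool :=
  (match (PySem.Dict.mk res).get? "selected_funds" with
   | some l => if List.isEmpty l then [] else l       -- `or []`
   | none => []).contains manager

def count_reentries_py_alt (results : List (List (String × List String))) (manager : String) : Int :=
  let sel : PySem.Set Int := PySem.Set.ofList
    (((PySem.List.enumerate results 0).filter (fun p => pvFlagB manager p.2)).map (fun p => p.1))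
  let starts : Int := ((sel.filter (fun i => !(PySem.Set.contains sel (i - 1)))).length : Int)
  starts - (if PySem.Set.contains sel 0 then 1 else 0)

-- ===== PRECONDITION & SPEC =====
def Spec_count_reentries_py (results : List (List (String × List String))) (manager : String) (out : Int) : Prop := out = count_reentries_py_alt results manager
instance (results : List (List (String × List String))) (manager : String) (out : Int) : Decidable (Spec_count_reentries_py results manager out) := by unfold Spec_count_reentries_py; infer_instance

-- ===== CLAIM (what is proved, stated in full; the proofs are below) =====
def Claim_equal_count_reentries_py : Prop := ∀ (results : List (List (String × List String))) (manager : String), Dom_count_reentries_py results manager → Spec_count_reentries_py results manager (count_reentries_py results manager)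

-- ===== LEMMAS AND PROOFS =====

-- rising-edge count with explicit previous flag (A's accumulator, abstracted)
def pvEdges (p : Bool) : List Bool → Int
  | [] => 0
  | f :: fs => (if f && !p then 1 else 0) + pvEdges f fs

-- the increasing list of indices (from s) whose flag is true (B's `sel` set, abstracted)
def pvSelIdx (s : Int) : List Bool → List Int
  | [] => []
  | f :: fs => (if f then [s] else []) ++ pvSelIdx (s + 1) fs

theorem set_contains_ofList (l : List String) (m : String) :
    PySem.Set.contains (PySem.Set.ofList l) m = l.contains m := by
  simp [PySem.Set.contains, PySem.Set.mem_ofList]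

-- ---- A-side: the fold computes pvEdges once past the first element ----
theorem pvStepA_eq (manager : String) (st : Int × Bool) (i : Int) (res : List (String × List String)) :
    pvStepA manager st (i, res)
    = ((if decide (i > 0) && pvFlagB manager res && !st.2 then st.1 + 1 else st.1),
       pvFlagB manager res) := by
  simp only [pvStepA, pvFlagB, set_contains_ofList]
  rfl

theorem foldA_tail (manager : String) (rest : List (List (String × List String)))
    (s : Int) (hs : 0 < s) (r : Int) (p : Bool) :
    ((PySem.List.enumerate rest s).foldl (pvStepA manager) (r, p)).1
    = r + pvEdges p (rest.map (pvFlagB manager)) := by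
  induction rest generalizing s r p with
  | nil => simp [PySem.List.enumerate, pvEdges]
  | cons hd tl ih =>
    rw [PySem.List.enumerate_cons]
    simp only [List.foldl_cons, List.map_cons, pvEdges, pvStepA_eq]
    have hg : decide (s > 0) = true := by simp [hs]
    rw [hg]
    rw [ih (s + 1) (by omega)]
    by_cases h : (pvFlagB manager hd && !p) = true
    · simp [h]; omega
    · simp [h]

-- ---- B-side: enumerate/filter/map produces pvSelIdx ----
theorem enum_filter_map (manager : String) (rs : List (List (String × List String))) (s : Int) :
    ((PySem.List.enumerate rs s).filter (fun p => pvFlagB manager p.2)).map (fun p => p.1)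
    = pvSelIdx s (rs.map (pvFlagB manager)) := by
  induction rs generalizing s with
  | nil => simp [PySem.List.enumerate, pvSelIdx]
  | cons hd tl ih =>
    rw [PySem.List.enumerate_cons]
    simp only [List.filter_cons, List.map_cons, pvSelIdx]
    by_cases h : pvFlagB manager hd = true
    · simp [h, ih]
    · simp [h, ih]

theorem pvSelIdx_ge (s : Int) (F : List Bool) : ∀ i ∈ pvSelIdx s F, s ≤ i := by
  induction F generalizing s with
  | nil => simp [pvSelIdx]
  | cons f fs ih =>
    intro i hi
    simp only [pvSelIdx, List.mem_append] at hi
    rcases hi with hi | hi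
    · rcases f with _ | _ <;> simp_all
    · have := ih (s + 1) i hi; omega

theorem pvSelIdx_nodup (s : Int) (F : List Bool) : (pvSelIdx s F).Nodup := by
  induction F generalizing s with
  | nil => simp [pvSelIdx]
  | cons f fs ih =>
    simp only [pvSelIdx]
    rcases f with _ | _
    · simpa using ih (s + 1)
    · simp only [reduceIte, List.singleton_append, List.nodup_cons]
      refine ⟨fun h => ?_, ih (s + 1)⟩
      have := pvSelIdx_ge (s + 1) fs s h; omega

-- ---- the counting lemma: block starts (w.r.t. a membership predicate C) = pvEdges ----
theorem pvCnt (F : List Bool) (s : Int) (p : Bool) (C : Int → Bool)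
    (hC : ∀ i, s - 1 ≤ i → C i = ((decide (i = s - 1) && p) || decide (i ∈ pvSelIdx s F))) :
    (((pvSelIdx s F).filter (fun i => !(C (i - 1)))).length : Int) = pvEdges p F := by
  induction F generalizing s p C with
  | nil => simp [pvSelIdx, pvEdges]
  | cons f fs ih =>
    have hhead : C (s - 1) = p := by
      rw [hC (s - 1) (by omega)]
      have hnm : s - 1 ∉ pvSelIdx s (f :: fs) := fun h => by
        have := pvSelIdx_ge s (f :: fs) _ h; omega
      simp [hnm]
    have htail : ∀ i, (s + 1) - 1 ≤ i →
        C i = ((decide (i = (s + 1) - 1) && f) || decide (i ∈ pvSelIdx (s + 1) fs)) := by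
      intro i hi
      rw [hC i (by omega)]
      have h1 : decide (i = s - 1) = false := by simp; omega
      have h2 : (i ∈ pvSelIdx s (f :: fs)) ↔ ((i = s ∧ f = true) ∨ i ∈ pvSelIdx (s + 1) fs) := by
        simp only [pvSelIdx, List.mem_append]
        rcases f with _ | _ <;> simp
      rw [h1]
      simp only [Bool.false_and, Bool.false_or]
      rcases f with _ | _
      · simp only [h2]; simp
      · simp only [h2]; by_cases h3 : i = s <;> simp [h3]
    have ihr := ih (s + 1) f C htail
    simp only [pvSelIdx, List.filter_append, List.length_append, pvEdges]
    push_cast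
    rw [ihr]
    rcases f with _ | _
    · simp
    · rcases p with _ | _ <;> simp [hhead]

-- ---- membership of 0 in pvSelIdx 0 (f :: fs) is the head flag ----
theorem zero_mem_selIdx (f : Bool) (fs : List Bool) :
    (0 : Int) ∈ pvSelIdx 0 (f :: fs) ↔ f = true := by
  simp only [pvSelIdx, List.mem_append]
  constructor
  · rintro (h | h)
    · rcases f with _ | _ <;> simp_all
    · exfalso; have := pvSelIdx_ge (0 + 1) fs 0 h; omega
  · intro h; left; simp [h]

theorem set_contains_int (l : List Int) (x : Int) :
    PySem.Set.contains l x = decide (x ∈ l) := by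
  simp [PySem.Set.contains]

-- B unfolded onto pvSelIdx / pvEdges
theorem alt_eq (results : List (List (String × List String))) (manager : String) :
    count_reentries_py_alt results manager
    = (((pvSelIdx 0 (results.map (pvFlagB manager))).filter
          (fun i => !(decide ((i - 1) ∈ pvSelIdx 0 (results.map (pvFlagB manager)))))).length : Int)
      - (if (0 : Int) ∈ pvSelIdx 0 (results.map (pvFlagB manager)) then 1 else 0) := by
  have hself : PySem.Set.ofList (pvSelIdx 0 (results.map (pvFlagB manager)))
      = pvSelIdx 0 (results.map (pvFlagB manager)) :=
    PySem.Set.ofList_eq_self_of_nodup _ (pvSelIdx_nodup _ _)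
  simp only [count_reentries_py_alt, enum_filter_map, set_contains_int, hself]
  simp

-- ===== VERDICT (by name: the statement is the Claim_ definition above) =====
theorem pvStepA_first (manager : String) (res : List (String × List String)) :
    pvStepA manager (0, false) (0, res) = (0, pvFlagB manager res) := by
  simp [pvStepA_eq]

theorem count_reentries_py_spec : Claim_equal_count_reentries_py := by
  intro results manager _
  unfold Spec_count_reentries_py
  rw [alt_eq]
  have hcnt := pvCnt (results.map (pvFlagB manager)) 0 false
      (fun i => decide (i ∈ pvSelIdx 0 (results.map (pvFlagB manager))))
      (by intro i _; simp)
  rw [hcnt]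
  unfold count_reentries_py
  cases results with
  | nil => simp [PySem.List.enumerate, pvEdges, pvSelIdx]
  | cons hd tl =>
    rw [PySem.List.enumerate_cons]
    simp only [List.foldl_cons, pvStepA_first]
    rw [foldA_tail manager tl (0 + 1) (by omega), zero_add]
    simp only [List.map_cons, pvEdges, zero_mem_selIdx]
    rcases h : pvFlagB manager hd with _ | _
    · simp
    · simp [h]
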